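-- pv_equiv track=rewrite | github.com/BrentOgden/ReName-main | scriptThread.py | get_surrounding_text
-- ===== SOURCE A (Python) =====
-- def get_surrounding_text(lines, entity_text, max_lines=4):
--     surrounding_text = ""
--     entity_found = False
--     lines_before_entity = []
--     lines_after_entity = []
--
--     for line in lines:
--         if entity_text in line:
--             entity_found = True
--             continue
--
--         if entity_found:
--             if len(lines_after_entity) < max_lines:
--                 lines_after_entity.append(line)
--         else:
--             if len(lines_before_entity) < max_lines:
--                 lines_before_entity.append(line)
--
--     surrounding_text += " ".join(lines_before_entity[::-1]) + " "  # Reverse lines_before_entity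
--     surrounding_text += " ".join(lines_after_entity)
--
--     return surrounding_text.strip()
-- ===== SOURCE B (Python) =====
-- def get_surrounding_text(lines, entity_text, max_lines=4):
--     lines = list(lines)
--     k = max(max_lines, 0)
--     idx = next((i for i, l in enumerate(lines) if entity_text in l), None)
--     if idx is None:
--         before, after = lines[:k], []
--     else:
--         before = lines[:idx][:k]
--         after = [l for l in lines[idx + 1:] if entity_text not in l][:k]
--     return (" ".join(reversed(before)) + " " + " ".join(after)).strip()
-- ===== Notes on version B (the rewrite author's own statement) =====
-- stated objective: alternative
-- what changed: Replaces A's single stateful pass (entity_found flag plus two capped accumulator lists) with a locate-then-slice decomposition: find the first matching index, then build 'before' by slicing and 'after' by filtering-and-slicing the suffix.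
import Mathlib
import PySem

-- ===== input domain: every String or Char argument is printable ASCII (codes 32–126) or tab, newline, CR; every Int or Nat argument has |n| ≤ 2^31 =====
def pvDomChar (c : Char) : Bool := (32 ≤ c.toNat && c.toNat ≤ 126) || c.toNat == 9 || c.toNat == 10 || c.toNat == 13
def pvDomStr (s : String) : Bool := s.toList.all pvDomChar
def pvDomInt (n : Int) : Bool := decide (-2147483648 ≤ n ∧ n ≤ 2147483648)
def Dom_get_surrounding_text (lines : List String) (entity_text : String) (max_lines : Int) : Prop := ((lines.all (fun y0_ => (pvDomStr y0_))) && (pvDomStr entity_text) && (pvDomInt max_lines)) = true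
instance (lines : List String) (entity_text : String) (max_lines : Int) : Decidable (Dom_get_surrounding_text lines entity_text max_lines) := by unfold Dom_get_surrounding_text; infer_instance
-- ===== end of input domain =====

-- B replaces A's single stateful pass with a locate-then-slice decomposition (same cost; 'alternative').

-- ===== PORT A =====
-- Literal transliteration: one fold over lines carrying (entity_found, lines_before, lines_after).
def get_surrounding_text (lines : List String) (entity_text : String) (max_lines : Int) : String :=
  let st := lines.foldl (fun (s : Bool × List String × List String) line =>
      if PySem.Str.isIn entity_text line then (true, s.2.1, s.2.2)
      else if s.1 then
        (s.1, s.2.1, if ((s.2.2.length : Int) < max_lines) then s.2.2 ++ [line] else s.2.2)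
      else
        (s.1, (if ((s.2.1.length : Int) < max_lines) then s.2.1 ++ [line] else s.2.1), s.2.2))
    (false, ([] : List String), ([] : List String))
  PySem.Str.strip (PySem.Str.join " " st.2.1.reverse ++ " " ++ PySem.Str.join " " st.2.2)

-- ===== PORT B =====
-- Transliteration of Source B: find first index whose line contains entity_text, then slice/filter.
def get_surrounding_text_alt (lines : List String) (entity_text : String) (max_lines : Int) : String :=
  let k : Int := max max_lines 0
  let p : List String × List String :=
    match lines.findIdx? (fun l => PySem.Str.isIn entity_text l) with
    | none => (lines.take k.toNat, [])
    | some i => ((lines.take i).take k.toNat,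
        ((lines.drop (i + 1)).filter (fun l => !PySem.Str.isIn entity_text l)).take k.toNat)
  PySem.Str.strip (PySem.Str.join " " p.1.reverse ++ " " ++ PySem.Str.join " " p.2)

-- ===== PRECONDITION & SPEC =====
def Spec_get_surrounding_text (lines : List String) (entity_text : String) (max_lines : Int) (out : String) : Prop := out = get_surrounding_text_alt lines entity_text max_lines
instance (lines : List String) (entity_text : String) (max_lines : Int) (out : String) : Decidable (Spec_get_surrounding_text lines entity_text max_lines out) := by unfold Spec_get_surrounding_text; infer_instance

-- ===== CLAIM (what is proved, stated in full; the proofs are below) =====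
def Claim_equal_get_surrounding_text : Prop := ∀ (lines : List String) (entity_text : String) (max_lines : Int), Dom_get_surrounding_text lines entity_text max_lines → Spec_get_surrounding_text lines entity_text max_lines (get_surrounding_text lines entity_text max_lines)

-- ===== LEMMAS AND PROOFS =====

-- A's capped append step, abstracted.
def capStep (k : Int) (acc : List String) (l : String) : List String :=
  if ((acc.length : Int) < k) then acc ++ [l] else acc

-- Capped accumulation is "append a take".
theorem foldl_capStep (k : Int) (ls acc : List String) :
    ls.foldl (capStep k) acc = acc ++ ls.take ((k - acc.length).toNat) := by
  induction ls generalizing acc with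
  | nil => simp
  | cons l t ih =>
    simp only [List.foldl_cons, capStep]
    by_cases h : ((acc.length : Int) < k)
    · rw [if_pos h, ih]
      have h1 : (k - acc.length).toNat = (k - (acc ++ [l]).length).toNat + 1 := by
        simp; omega
      rw [h1]
      simp
    · rw [if_neg h, ih]
      have h1 : (k - acc.length).toNat = 0 := by omega
      rw [h1]
      simp

-- A's fold step, abstracted over the membership test.
def aStep (c : String → Bool) (k : Int) (s : Bool × List String × List String) (line : String) :
    Bool × List String × List String :=
  if c line then (true, s.2.1, s.2.2)
  else if s.1 then (s.1, s.2.1, capStep k s.2.2 line)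
  else (s.1, capStep k s.2.1 line, s.2.2)

-- After the entity has been found, remaining lines filter into the 'after' accumulator.
theorem foldl_aStep_found (c : String → Bool) (k : Int) (ls : List String)
    (b a : List String) :
    ls.foldl (aStep c k) (true, b, a) =
      (true, b, (ls.filter (fun l => !c l)).foldl (capStep k) a) := by
  induction ls generalizing a with
  | nil => simp
  | cons l t ih =>
    simp only [List.foldl_cons, aStep, List.filter_cons]
    by_cases h : c l
    · simp [h, ih]
    · simp [h, ih]

-- Before the entity is found, the fold is characterised by the first matching index.
theorem foldl_aStep_pre (c : String → Bool) (k : Int) (ls : List String) (b : List String) :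
    ls.foldl (aStep c k) (false, b, []) =
      (match ls.findIdx? c with
       | none => (false, ls.foldl (capStep k) b, [])
       | some i => (true, (ls.take i).foldl (capStep k) b,
           ((ls.drop (i + 1)).filter (fun l => !c l)).foldl (capStep k) [])) := by
  induction ls generalizing b with
  | nil => simp
  | cons l t ih =>
    rw [List.findIdx?_cons]
    by_cases h : c l
    · simp only [List.foldl_cons, aStep, h, if_pos]
      rw [foldl_aStep_found]
      simp
    · simp only [List.foldl_cons, aStep, h, Bool.false_eq_true, if_false]
      rw [ih]
      cases hf : t.findIdx? c with
      | none => simp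
      | some i => simp

-- ===== VERDICT (by name: the statement is the Claim_ definition above) =====
theorem get_surrounding_text_spec : Claim_equal_get_surrounding_text := by
  intro lines entity_text max_lines _
  unfold Spec_get_surrounding_text get_surrounding_text get_surrounding_text_alt
  have hstep : (fun (s : Bool × List String × List String) line =>
      if PySem.Str.isIn entity_text line then (true, s.2.1, s.2.2)
      else if s.1 then
        (s.1, s.2.1, if ((s.2.2.length : Int) < max_lines) then s.2.2 ++ [line] else s.2.2)
      else
        (s.1, (if ((s.2.1.length : Int) < max_lines) then s.2.1 ++ [line] else s.2.1), s.2.2))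
      = aStep (fun l => PySem.Str.isIn entity_text l) max_lines := by
    funext s line
    simp [aStep, capStep]
  rw [hstep, foldl_aStep_pre]
  have hk : max_lines.toNat = (max max_lines 0).toNat := by omega
  cases hf : lines.findIdx? (fun l => PySem.Str.isIn entity_text l) with
  | none =>
    dsimp only
    rw [foldl_capStep]
    simp [hk]
  | some i =>
    dsimp only
    rw [foldl_capStep, foldl_capStep]
    simp [hk]
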